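-- pv_equiv track=rewrite | github.com/RajivRatan27/adobe_challenge_1a | round1a_implementation.py | fix_overlapping_stutter
-- ===== SOURCE A (Python) =====
-- def fix_overlapping_stutter(text):
--     """Stage 3: Fixes complex overlapping stutters like 'Proposaloposal' -> 'Proposal'."""
--     words = text.split()
--     fixed_words = []
--     for word in words:
--         if len(word) < 4:
--             fixed_words.append(word)
--             continue
--
--         best_prefix = word
--         for i in range(len(word) // 2, 0, -1):
--             prefix = word[:i]
--             remainder = word[i:]
--             if prefix.endswith(remainder) or remainder == prefix:
--                 best_prefix = prefix
--                 break
--         fixed_words.append(best_prefix)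
--     return " ".join(fixed_words)
-- ===== SOURCE B (Python) =====
-- def fix_overlapping_stutter(text):
--     out = []
--     for word in text.split():
--         n = len(word)
--         h = n // 2
--         if n >= 4 and n % 2 == 0 and word[:h] == word[h:]:
--             out.append(word[:h])
--         else:
--             out.append(word)
--     return " ".join(out)
-- ===== Notes on version B (the rewrite author's own statement) =====
-- stated objective: faster
-- what changed: Replaces A's descending break-loop over candidate prefixes (which can only ever succeed at i = len//2) by a single closed-form check per word: even length >= 4 and the two halves equal.
import Mathlib
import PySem

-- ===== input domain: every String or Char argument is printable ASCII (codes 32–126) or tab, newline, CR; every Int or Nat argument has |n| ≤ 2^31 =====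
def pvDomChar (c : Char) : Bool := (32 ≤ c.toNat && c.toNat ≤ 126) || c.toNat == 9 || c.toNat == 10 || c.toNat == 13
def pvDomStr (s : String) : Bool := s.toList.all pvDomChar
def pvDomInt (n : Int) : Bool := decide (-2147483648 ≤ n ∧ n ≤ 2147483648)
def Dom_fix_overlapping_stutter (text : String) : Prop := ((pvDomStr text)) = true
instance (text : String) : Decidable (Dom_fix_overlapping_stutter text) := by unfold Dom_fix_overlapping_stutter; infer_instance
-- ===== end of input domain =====

-- B replaces A's descending break-loop over candidate prefixes by a single closed-form
-- half-equality check per word (objective: simpler).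

-- ===== PORT A =====
-- the body of A's inner loop condition: prefix.endswith(remainder) or remainder == prefix
def pvCondA (w : List Char) (i : Int) : Bool :=
  PySem.Chars.endswith (PySem.List.slice w none (some i)) (PySem.List.slice w (some i) none)
    || (PySem.List.slice w (some i) none == PySem.List.slice w none (some i))

-- A's 'for i in range(len(word)//2, 0, -1): … break' with best_prefix = word as fallback
def pvLoopA (w : List Char) : List Int → List Char
  | [] => w
  | i :: rest => if pvCondA w i then PySem.List.slice w none (some i) else pvLoopA w rest

-- A's per-word body ('if len(word) < 4: append word; continue')
def pvFixWordA (w : List Char) : List Char :=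
  if w.length < 4 then w
  else pvLoopA w (PySem.List.pyRange (PySem.Int.floordiv (w.length : Int) 2) 0 (-1))

def fix_overlapping_stutter (text : String) : String :=
  let words := PySem.Chars.split₀ text.toList
  let fixed_words := words.foldl (fun acc w => acc ++ [pvFixWordA w]) []
  String.ofList (PySem.Chars.join [' '] fixed_words)

-- ===== PORT B =====
def pvFixWordB (w : List Char) : List Char :=
  let n := w.length
  let h := n / 2
  if 4 ≤ n && n % 2 == 0 && w.take h == w.drop h then w.take h else w

def fix_overlapping_stutter_alt (text : String) : String :=
  String.ofList (PySem.Chars.join [' '] ((PySem.Chars.split₀ text.toList).map pvFixWordB))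

-- ===== PRECONDITION & SPEC =====
def Spec_fix_overlapping_stutter (text : String) (out : String) : Prop := out = fix_overlapping_stutter_alt text
instance (text : String) (out : String) : Decidable (Spec_fix_overlapping_stutter text out) := by unfold Spec_fix_overlapping_stutter; infer_instance

-- ===== CLAIM (what is proved, stated in full; the proofs are below) =====
def Claim_equal_fix_overlapping_stutter : Prop := ∀ (text : String), Dom_fix_overlapping_stutter text → Spec_fix_overlapping_stutter text (fix_overlapping_stutter text)

-- ===== LEMMAS AND PROOFS =====

-- For 2*i < len(w) the remainder is strictly longer than the prefix, so A's test is false.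
theorem pvCondA_false (w : List Char) (i : Int) (h0 : 0 ≤ i) (h2 : 2 * i.toNat < w.length) :
    pvCondA w i = false := by
  unfold pvCondA
  rw [PySem.List.slice_to w h0, PySem.List.slice_from w h0]
  have hk : i.toNat ≤ w.length := by omega
  have hlen : (w.take i.toNat).length < (w.drop i.toNat).length := by
    simp [List.length_take, List.length_drop]; omega
  have h1 : PySem.Chars.endswith (w.take i.toNat) (w.drop i.toNat) = false := by
    by_contra h
    have := PySem.Chars.endswith_iff (w.take i.toNat) (w.drop i.toNat) |>.mp
      (by revert h; cases PySem.Chars.endswith (w.take i.toNat) (w.drop i.toNat) <;> simp)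
    have := this.length_le
    omega
  have h2' : (w.drop i.toNat == w.take i.toNat) = false := by
    simp only [beq_eq_false_iff_ne, ne_eq]
    intro h
    rw [h] at hlen
    omega
  rw [h1, h2']
  rfl

theorem pvLoopA_all_false (w : List Char) (rs : List Int)
    (h : ∀ i ∈ rs, pvCondA w i = false) : pvLoopA w rs = w := by
  induction rs with
  | nil => rfl
  | cons i rest ih =>
      simp only [pvLoopA, h i (by simp)]
      exact ih (fun j hj => h j (by simp [hj]))

theorem pvFixWord_eq (w : List Char) : pvFixWordA w = pvFixWordB w := by
  unfold pvFixWordA pvFixWordB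
  by_cases h4 : w.length < 4
  · have : ¬ (4 ≤ w.length) := by omega
    simp [h4, this]
  · rw [Nat.not_lt] at h4
    have hfd : PySem.Int.floordiv (w.length : Int) 2 = ((w.length / 2 : Nat) : Int) := by
      exact_mod_cast PySem.Int.floordiv_natCast w.length 2
    have hpos : (0 : Int) < ((w.length / 2 : Nat) : Int) := by
      have : 2 ≤ w.length / 2 := by omega
      exact_mod_cast by omega
    rw [if_neg (by omega), hfd, PySem.List.pyRange_neg_one_cons hpos]
    have htail : ∀ i ∈ PySem.List.pyRange (((w.length / 2 : Nat) : Int) - 1) 0 (-1),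
        pvCondA w i = false := by
      intro i hi
      rw [PySem.List.mem_pyRange_neg_one] at hi
      apply pvCondA_false w i (by omega)
      have hi2 : i.toNat ≤ w.length / 2 - 1 := by omega
      omega
    have hslt : PySem.List.slice w none (some ((w.length / 2 : Nat) : Int)) = w.take (w.length / 2) := by
      rw [PySem.List.slice_to w (by positivity)]; congr 1
    have hslf : PySem.List.slice w (some ((w.length / 2 : Nat) : Int)) none = w.drop (w.length / 2) := by
      rw [PySem.List.slice_from w (by positivity)]; congr 1
    by_cases hev : w.length % 2 = 0
    · -- even length: the head candidate i = len//2 tests exactly half-equality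
      have hlen2 : (w.drop (w.length / 2)).length = (w.take (w.length / 2)).length := by
        simp [List.length_take, List.length_drop]; omega
      by_cases heq : w.take (w.length / 2) = w.drop (w.length / 2)
      · have hcond : pvCondA w ((w.length / 2 : Nat) : Int) = true := by
          unfold pvCondA
          rw [hslt, hslf]
          simp [heq]
        have hbc : (4 ≤ w.length && w.length % 2 == 0
            && (w.take (w.length / 2) == w.drop (w.length / 2))) = true := by
          simp [h4, hev, heq]
        simp only [pvLoopA, hcond, if_true, hslt, hbc]
      · have hcond : pvCondA w ((w.length / 2 : Nat) : Int) = false := by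
          unfold pvCondA
          rw [hslt, hslf]
          have hes : PySem.Chars.endswith (w.take (w.length / 2)) (w.drop (w.length / 2)) = false := by
            by_contra hc
            have hsuf := PySem.Chars.endswith_iff (w.take (w.length / 2)) (w.drop (w.length / 2)) |>.mp
              (by revert hc; cases PySem.Chars.endswith (w.take (w.length / 2)) (w.drop (w.length / 2)) <;> simp)
            exact heq ((List.IsSuffix.eq_of_length hsuf hlen2).symm)
          have hne : (w.drop (w.length / 2) == w.take (w.length / 2)) = false := by
            simp only [beq_eq_false_iff_ne, ne_eq]
            exact fun hc => heq hc.symm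
          rw [hes, hne]; rfl
        have hbc : (4 ≤ w.length && w.length % 2 == 0
            && (w.take (w.length / 2) == w.drop (w.length / 2))) = false := by
          simp [heq]
        simp only [pvLoopA, hcond, hbc, Bool.false_eq_true, if_false,
          pvLoopA_all_false w _ htail]
    · -- odd length: no candidate ever matches, both sides return w unchanged
      have hhead : pvCondA w ((w.length / 2 : Nat) : Int) = false := by
        apply pvCondA_false w _ (by positivity)
        have : 2 * (w.length / 2) < w.length := by omega
        simpa using this
      have hbc : (4 ≤ w.length && w.length % 2 == 0
          && (w.take (w.length / 2) == w.drop (w.length / 2))) = false := by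
        simp [hev]
      simp only [pvLoopA, hhead, hbc, Bool.false_eq_true, if_false,
        pvLoopA_all_false w _ htail]

-- ===== VERDICT (by name: the statement is the Claim_ definition above) =====
theorem fix_overlapping_stutter_spec : Claim_equal_fix_overlapping_stutter := by
  intro text _
  unfold Spec_fix_overlapping_stutter
  simp only [fix_overlapping_stutter, fix_overlapping_stutter_alt,
    PySem.List.foldl_append_singleton_eq_map, List.nil_append, pvFixWord_eq]
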